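-- pv_equiv track=rewrite | github.com/CompEpigen/methylbert | methylbert/data/simulation.py | long_read_cpg_sample
-- ===== SOURCE A (Python) =====
-- def long_read_cpg_sample(r_start: int, r_end: int, r_seq: str, dmr):
--     cpg_loci = list()
--     before_dmr = 0
--     after_dmr = 0
--     for j in range(len(r_seq) - 2):
--         if r_seq[j:j+2] == "CG":
--             cpg_loci.append(j)
--             if r_start + j < dmr["start"]:
--                 before_dmr += 1
--             elif r_start + j > dmr["end"]:
--                 after_dmr +=1
--     return cpg_loci, before_dmr, after_dmr
-- ===== SOURCE B (Python) =====
-- from bisect import bisect_left, bisect_right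
--
--
-- def long_read_cpg_sample(r_start: int, r_end: int, r_seq: str, dmr):
--     # jump from one "CG" occurrence to the next with str.find (dropping a match at
--     # the final position len-2, which A's range never reaches), then count with
--     # bisect on the sorted loci list
--     cpg_loci = []
--     last = len(r_seq) - 3
--     j = r_seq.find("CG")
--     while 0 <= j <= last:
--         cpg_loci.append(j)
--         j = r_seq.find("CG", j + 1)
--     if not cpg_loci:
--         return cpg_loci, 0, 0
--     before_dmr = bisect_left(cpg_loci, dmr["start"] - r_start)
--     after_dmr = len(cpg_loci) - bisect_right(cpg_loci, dmr["end"] - r_start)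
--     return cpg_loci, before_dmr, after_dmr
-- ===== Notes on version B (the rewrite author's own statement) =====
-- stated objective: alternative
-- what changed: Replaces A's fused per-index loop (a 2-char slice comparison and in-loop counter updates at every position) by a str.find-to-find scan that jumps between 'CG' occurrences to build the loci list, then computes both counts by binary search (bisect_left / len - bisect_right) on the sorted loci.
-- outside the precondition, e.g. on long_read_cpg_sample(0, 0, 'CGA', {'start': 10}): A returns ([0], 1, 0), B raises KeyError; on long_read_cpg_sample(0, 0, 'ACGT', {'start': 3, 'end': 0}): A returns ([1], 1, 0), B returns ([1], 1, 1)
import Mathlib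
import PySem

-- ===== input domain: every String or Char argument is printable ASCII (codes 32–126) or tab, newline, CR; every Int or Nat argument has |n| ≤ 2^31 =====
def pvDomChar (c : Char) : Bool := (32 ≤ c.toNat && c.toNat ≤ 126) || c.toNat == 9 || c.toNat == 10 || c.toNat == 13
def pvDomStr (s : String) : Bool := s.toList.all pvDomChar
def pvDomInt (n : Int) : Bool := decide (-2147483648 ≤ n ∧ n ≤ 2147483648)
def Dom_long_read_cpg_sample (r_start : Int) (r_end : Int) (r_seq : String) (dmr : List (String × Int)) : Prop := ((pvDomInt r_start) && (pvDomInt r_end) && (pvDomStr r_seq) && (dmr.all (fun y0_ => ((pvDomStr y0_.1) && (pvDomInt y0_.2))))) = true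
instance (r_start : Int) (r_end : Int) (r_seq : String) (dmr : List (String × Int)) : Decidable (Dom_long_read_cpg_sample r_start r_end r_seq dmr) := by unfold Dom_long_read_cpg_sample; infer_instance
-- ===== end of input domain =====

-- B replaces A's fused index loop (slice-compare at every position, counters updated inside the
-- scan) by a find-driven scan that jumps from one "CG" occurrence to the next, followed by two
-- binary searches (bisect) on the sorted loci list.

-- dict lookup d[k] (first match; none = KeyError), shared by both ports and Pre_
def pvGet (d : List (String × Int)) (k : String) : Option Int :=
  (d.find? (fun kv => kv.1 == k)).map (·.2)

-- ===== PORT A =====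
def long_read_cpg_sample (r_start : Int) (r_end : Int) (r_seq : String) (dmr : List (String × Int)) : List Int × Int × Int :=
  (PySem.List.pyRange 0 (PySem.Str.len r_seq - 2)).foldl
    (fun st j =>
      if PySem.Str.slice r_seq (some j) (some (j + 2)) = "CG" then
        let cpg := st.1 ++ [j]
        if r_start + j < (pvGet dmr "start").getD 0 then (cpg, st.2.1 + 1, st.2.2)
        else if r_start + j > (pvGet dmr "end").getD 0 then (cpg, st.2.1, st.2.2 + 1)
        else (cpg, st.2.1, st.2.2)
      else st)
    ([], 0, 0)

-- ===== PORT B =====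
-- the 'while 0 <= j <= last: loci.append(j); j = r_seq.find("CG", j+1)' loop of Source B
-- (fuel = remaining loop steps, bounded by len(r_seq)+1 since find always moves j forward)
def pvScanCG (s : List Char) (last : Int) : Int → Nat → List Int
  | _, 0 => []
  | j, fuel + 1 =>
    if 0 ≤ j ∧ j ≤ last then
      j :: pvScanCG s last (PySem.Chars.findFrom s ['C', 'G'] (j + 1)) fuel
    else []

def long_read_cpg_sample_alt (r_start : Int) (r_end : Int) (r_seq : String) (dmr : List (String × Int)) : List Int × Int × Int :=
  let s := r_seq.toList
  let loci := pvScanCG s ((s.length : Int) - 3) (PySem.Chars.find s ['C', 'G']) (s.length + 1)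
  if loci.isEmpty then (loci, 0, 0)
  else
    let before : Int := PySem.List.bisectLeft loci ((pvGet dmr "start").getD 0 - r_start)
    let after : Int := (loci.length : Int) - PySem.List.bisectRight loci ((pvGet dmr "end").getD 0 - r_start)
    (loci, before, after)

-- ===== PRECONDITION & SPEC =====
-- Pre_ excludes inputs on which A raises KeyError (a CpG site exists but dmr lacks a "start"/"end"
-- key it then looks up), and the defensible corner of a malformed region with start > end, where a
-- locus in the gap is assigned to 'before' by A's elif but counted on both sides by B.
def Pre_long_read_cpg_sample (r_start : Int) (r_end : Int) (r_seq : String) (dmr : List (String × Int)) : Prop :=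
  ['C', 'G'] <:+: r_seq.toList.dropLast →
    (pvGet dmr "start").isSome = true ∧ (pvGet dmr "end").isSome = true ∧
      (pvGet dmr "start").getD 0 ≤ (pvGet dmr "end").getD 0
instance (r_start : Int) (r_end : Int) (r_seq : String) (dmr : List (String × Int)) : Decidable (Pre_long_read_cpg_sample r_start r_end r_seq dmr) := by unfold Pre_long_read_cpg_sample; infer_instance

def pvWitness_long_read_cpg_sample : Int × Int × String × (List (String × Int)) :=
  (3, 0, "ACGT", [("start", 2), ("end", 6)])

def Spec_long_read_cpg_sample (r_start : Int) (r_end : Int) (r_seq : String) (dmr : List (String × Int)) (out : List Int × Int × Int) : Prop := out = long_read_cpg_sample_alt r_start r_end r_seq dmr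
instance (r_start : Int) (r_end : Int) (r_seq : String) (dmr : List (String × Int)) (out : List Int × Int × Int) : Decidable (Spec_long_read_cpg_sample r_start r_end r_seq dmr out) := by unfold Spec_long_read_cpg_sample; infer_instance

-- ===== CLAIM (what is proved, stated in full; the proofs are below) =====
def Claim_equal_long_read_cpg_sample : Prop := ∀ (r_start : Int) (r_end : Int) (r_seq : String) (dmr : List (String × Int)), Dom_long_read_cpg_sample r_start r_end r_seq dmr → Pre_long_read_cpg_sample r_start r_end r_seq dmr → Spec_long_read_cpg_sample r_start r_end r_seq dmr (long_read_cpg_sample r_start r_end r_seq dmr)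

-- ===== LEMMAS AND PROOFS =====

-- A's fused loop, split into the filtered loci list and the two counters
theorem pv_foldA_eq (P lt gt : Int → Prop) [DecidablePred P] [DecidablePred lt] [DecidablePred gt]
    (l : List Int) (L0 : List Int) (B0 A0 : Int) :
    l.foldl (fun st j =>
        if P j then
          let cpg := st.1 ++ [j]
          if lt j then (cpg, st.2.1 + 1, st.2.2)
          else if gt j then (cpg, st.2.1, st.2.2 + 1)
          else (cpg, st.2.1, st.2.2)
        else st) (L0, B0, A0)
    = (L0 ++ l.filter (fun j => decide (P j)),
       B0 + (l.countP (fun j => decide (P j) && decide (lt j)) : Int),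
       A0 + (l.countP (fun j => decide (P j) && !decide (lt j) && decide (gt j)) : Int)) := by
  induction l generalizing L0 B0 A0 with
  | nil => simp
  | cons x xs ih =>
    simp only [List.foldl_cons, List.filter_cons, List.countP_cons]
    by_cases h1 : P x
    · by_cases h2 : lt x
      · simp [h1, h2, ih] <;> omega
      · by_cases h3 : gt x
        · simp [h1, h2, h3, ih] <;> omega
        · simp [h1, h2, h3, ih]
    · simp [h1, ih]

-- the slice test of A at a nonnegative index is the two-character-prefix test
theorem pv_isCG_iff (r_seq : String) (j : Int) (hj : 0 ≤ j) :
    PySem.Str.slice r_seq (some j) (some (j + 2)) = "CG" ↔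
      ['C', 'G'] <+: r_seq.toList.drop j.toNat := by
  rw [← String.toList_inj, PySem.Str.toList_slice]
  have hCG : "CG".toList = ['C', 'G'] := rfl
  rw [hCG]
  simp only [PySem.Chars.slice_eq_listSlice]
  rw [PySem.List.slice_toNat _ hj (by omega)]
  have h2 : (j + 2).toNat - j.toNat = 2 := by omega
  rw [h2]
  rw [List.prefix_iff_eq_take]
  constructor
  · intro h; simpa using h.symm
  · intro h; simpa using h.symm

-- the find-to-find scan of B produces exactly the filtered range
theorem pv_scan_eq (s : List Char) (fuel : Nat) : ∀ (k : Nat), k ≤ s.length → s.length - k < fuel →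
    pvScanCG s ((s.length : Int) - 3) (PySem.Chars.findFrom s ['C', 'G'] (k : Int)) fuel
    = (PySem.List.pyRange (k : Int) ((s.length : Int) - 2)).filter
        (fun j => decide (['C', 'G'] <+: s.drop j.toNat)) := by
  induction fuel with
  | zero => intro k hk h; omega
  | succ fuel ih =>
    intro k hk hfuel
    by_cases hneg : PySem.Chars.findFrom s ['C', 'G'] (k : Int) = -1
    · rw [hneg]
      have hno : ¬ ['C', 'G'] <:+: s.drop k :=
        (PySem.Chars.findFrom_natCast_eq_neg_one_iff s _ k hk).mp hneg
      simp only [pvScanCG]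
      rw [if_neg (by omega)]
      symm
      rw [List.filter_eq_nil_iff]
      intro j hj hp
      rw [PySem.List.mem_pyRange_one] at hj
      have hpre : ['C', 'G'] <+: s.drop j.toNat := by simpa using hp
      apply hno
      have hdd : (s.drop k).drop (j.toNat - k) = s.drop j.toNat := by
        rw [List.drop_drop]
        congr 1
        omega
      exact (hdd ▸ hpre).isInfix.trans (List.drop_suffix _ _).isInfix
    · obtain ⟨hk0, hpre0, hmin⟩ := PySem.Chars.findFrom_natCast_spec s ['C', 'G'] k hk hneg
      set j0 := PySem.Chars.findFrom s ['C', 'G'] (k : Int) with hj0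
      have hj0nn : 0 ≤ j0 := le_trans (by exact_mod_cast Int.ofNat_nonneg k) hk0
      have hj0len : j0.toNat + 2 ≤ s.length := by
        have hl := hpre0.length_le
        simp only [List.length_cons, List.length_nil, List.length_drop] at hl
        omega
      by_cases hcase : j0 ≤ (s.length : Int) - 3
      · simp only [pvScanCG]
        rw [if_pos ⟨hj0nn, hcase⟩]
        have hcast : j0 + 1 = ((j0.toNat + 1 : Nat) : Int) := by omega
        rw [hcast, ih (j0.toNat + 1) (by omega) (by omega)]
        have hsplit : PySem.List.pyRange (k : Int) ((s.length : Int) - 2)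
            = PySem.List.pyRange (k : Int) j0 ++ PySem.List.pyRange j0 ((s.length : Int) - 2) :=
          PySem.List.pyRange_one_append _ _ _ hk0 (by omega)
        rw [hsplit, List.filter_append]
        rw [PySem.List.pyRange_one_cons (show j0 < (s.length : Int) - 2 by omega)]
        rw [List.filter_cons]
        have hfilt : (PySem.List.pyRange (k : Int) j0).filter
            (fun j => decide (['C', 'G'] <+: s.drop j.toNat)) = [] := by
          rw [List.filter_eq_nil_iff]
          intro j hj hp
          rw [PySem.List.mem_pyRange_one] at hj
          exact hmin j.toNat (by omega) (by omega) (by simpa using hp)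
        rw [hfilt, show ((j0.toNat + 1 : Nat) : Int) = j0 + 1 by omega]
        simp [hpre0]
      · simp only [pvScanCG]
        rw [if_neg (fun hc => hcase hc.2)]
        symm
        rw [List.filter_eq_nil_iff]
        intro j hj hp
        rw [PySem.List.mem_pyRange_one] at hj
        exact hmin j.toNat (by omega) (by omega) (by simpa using hp)

-- a CpG locus inside A's scanned range means "CG" occurs in r_seq[:-1]
theorem pv_nonempty_infix (s : List Char) (j : Int) (hj : 0 ≤ j) (hlt : j < (s.length : Int) - 2)
    (h : ['C', 'G'] <+: s.drop j.toNat) : ['C', 'G'] <:+: s.dropLast := by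
  rw [List.dropLast_eq_take]
  have h1 : ['C', 'G'] <+: (List.take (s.length - 1) s).drop j.toNat := by
    rw [List.drop_take, List.prefix_take_iff]
    exact ⟨h, by simp only [List.length_cons, List.length_nil]; omega⟩
  exact h1.isInfix.trans (List.drop_suffix _ _).isInfix

-- bisect on a ≤-sorted list counts the strictly smaller / strictly larger elements
theorem pv_bisectLeft_eq (xs : List Int) (x : Int) (h : xs.Pairwise (· ≤ ·)) :
    (PySem.List.bisectLeft xs x : Int) = (xs.countP (fun y => decide (y < x)) : Int) := by
  obtain ⟨hle, hlt, hge⟩ := PySem.List.bisectLeft_spec xs x h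
  set b := PySem.List.bisectLeft xs x with hb
  have key : xs.countP (fun y => decide (y < x)) = b := by
    conv_lhs => rw [← List.take_append_drop b xs]
    rw [List.countP_append]
    have h1 : (xs.take b).countP (fun y => decide (y < x)) = b := by
      rw [List.countP_eq_length.mpr, List.length_take, min_eq_left hle]
      intro a ha
      obtain ⟨i, hi, hia⟩ := List.mem_iff_getElem.mp ha
      have hib : i < b := by simp only [List.length_take] at hi; omega
      have hilen : i < xs.length := by simp only [List.length_take] at hi; omega
      rw [← hia, List.getElem_take]
      simpa using hlt i hilen hib
    have h2 : (xs.drop b).countP (fun y => decide (y < x)) = 0 := by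
      rw [List.countP_eq_zero]
      intro a ha
      obtain ⟨i, hi, hia⟩ := List.mem_iff_getElem.mp ha
      have hilen : b + i < xs.length := by simp only [List.length_drop] at hi; omega
      have := hge (b + i) hilen (by omega)
      rw [← hia, List.getElem_drop]
      simpa using by omega
    rw [h1, h2]
    omega
  omega

theorem pv_bisectRight_eq (xs : List Int) (x : Int) (h : xs.Pairwise (· ≤ ·)) :
    ((xs.length : Int) - PySem.List.bisectRight xs x) = (xs.countP (fun y => decide (x < y)) : Int) := by
  obtain ⟨hle, hlt, hge⟩ := PySem.List.bisectRight_spec xs x h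
  set b := PySem.List.bisectRight xs x with hb
  have key : xs.countP (fun y => decide (x < y)) = xs.length - b := by
    conv_lhs => rw [← List.take_append_drop b xs]
    rw [List.countP_append]
    have h1 : (xs.take b).countP (fun y => decide (x < y)) = 0 := by
      rw [List.countP_eq_zero]
      intro a ha
      obtain ⟨i, hi, hia⟩ := List.mem_iff_getElem.mp ha
      have hib : i < b := by simp only [List.length_take] at hi; omega
      have hilen : i < xs.length := by simp only [List.length_take] at hi; omega
      have := hlt i hilen hib
      rw [← hia, List.getElem_take]
      simpa using by omega
    have h2 : (xs.drop b).countP (fun y => decide (x < y)) = (xs.drop b).length := by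
      rw [List.countP_eq_length]
      intro a ha
      obtain ⟨i, hi, hia⟩ := List.mem_iff_getElem.mp ha
      have hilen : b + i < xs.length := by simp only [List.length_drop] at hi; omega
      have := hge (b + i) hilen (by omega)
      rw [← hia, List.getElem_drop]
      simpa using this
    rw [h1, h2, List.length_drop]
    omega
  omega

-- ===== VERDICT (by name: the statement is the Claim_ definition above) =====
theorem long_read_cpg_sample_spec : Claim_equal_long_read_cpg_sample := by
  unfold Claim_equal_long_read_cpg_sample
  intro r_start r_end r_seq dmr _hDom hPre
  unfold Spec_long_read_cpg_sample
  simp only [long_read_cpg_sample, long_read_cpg_sample_alt]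
  set s := r_seq.toList with hs
  have hlen : PySem.Str.len r_seq = ((s.length : Int)) := by simp [hs]
  rw [hlen]
  rw [pv_foldA_eq (fun j => PySem.Str.slice r_seq (some j) (some (j + 2)) = "CG")
      (fun j => r_start + j < (pvGet dmr "start").getD 0)
      (fun j => r_start + j > (pvGet dmr "end").getD 0)]
  set sv := (pvGet dmr "start").getD 0 with hsv
  set ev := (pvGet dmr "end").getD 0 with hev
  -- identify the loci list on both sides
  have hfilt : (PySem.List.pyRange 0 ((s.length : Int) - 2)).filter
        (fun j => decide (PySem.Str.slice r_seq (some j) (some (j + 2)) = "CG"))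
      = (PySem.List.pyRange 0 ((s.length : Int) - 2)).filter
        (fun j => decide (['C', 'G'] <+: s.drop j.toNat)) := by
    apply List.filter_congr
    intro j hj
    rw [PySem.List.mem_pyRange_one] at hj
    simp only [decide_eq_decide]
    exact pv_isCG_iff r_seq j hj.1
  have hloci : pvScanCG s ((s.length : Int) - 3) (PySem.Chars.find s ['C', 'G']) (s.length + 1)
      = (PySem.List.pyRange 0 ((s.length : Int) - 2)).filter
        (fun j => decide (['C', 'G'] <+: s.drop j.toNat)) := by
    rw [← PySem.Chars.findFrom_zero]
    have := pv_scan_eq s (s.length + 1) 0 (Nat.zero_le _) (by omega)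
    simpa using this
  rw [hfilt, hloci]
  set L := (PySem.List.pyRange 0 ((s.length : Int) - 2)).filter
      (fun j => decide (['C', 'G'] <+: s.drop j.toNat)) with hL
  have hsorted : L.Pairwise (· ≤ ·) :=
    ((PySem.List.pairwise_lt_pyRange_one 0 ((s.length : Int) - 2)).filter _).imp le_of_lt
  by_cases hLnil : L = []
  · have hnone : ∀ j ∈ PySem.List.pyRange 0 ((s.length : Int) - 2),
        ¬ (['C', 'G'] <+: s.drop j.toNat) := by
      intro j hj hp
      have : j ∈ L := by rw [hL, List.mem_filter]; exact ⟨hj, by simpa using hp⟩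
      rw [hLnil] at this
      exact absurd this (List.not_mem_nil)
    have hc1 : (PySem.List.pyRange 0 ((s.length : Int) - 2)).countP
        (fun j => decide (PySem.Str.slice r_seq (some j) (some (j + 2)) = "CG") &&
          decide (r_start + j < sv)) = 0 := by
      rw [List.countP_eq_zero]
      intro j hj
      have hcgF : decide (PySem.Str.slice r_seq (some j) (some (j + 2)) = "CG") = false := by
        simp only [decide_eq_false_iff_not]
        intro hcg
        exact hnone j hj ((pv_isCG_iff r_seq j (PySem.List.mem_pyRange_one.mp hj).1).mp hcg)
      simp [hcgF]
    have hc2 : (PySem.List.pyRange 0 ((s.length : Int) - 2)).countP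
        (fun j => decide (PySem.Str.slice r_seq (some j) (some (j + 2)) = "CG") &&
          !decide (r_start + j < sv) && decide (r_start + j > ev)) = 0 := by
      rw [List.countP_eq_zero]
      intro j hj
      have hcgF : decide (PySem.Str.slice r_seq (some j) (some (j + 2)) = "CG") = false := by
        simp only [decide_eq_false_iff_not]
        intro hcg
        exact hnone j hj ((pv_isCG_iff r_seq j (PySem.List.mem_pyRange_one.mp hj).1).mp hcg)
      simp [hcgF]
    rw [hLnil]
    simp only [List.isEmpty_nil, if_pos]
    simp [hc1, hc2]
  · -- a CpG site exists: Pre_ supplies well-formed dmr bounds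
    obtain ⟨j1, hj1⟩ := List.exists_mem_of_ne_nil L hLnil
    have hj1' : j1 ∈ PySem.List.pyRange 0 ((s.length : Int) - 2) ∧
        (['C', 'G'] <+: s.drop j1.toNat) := by
      rw [hL, List.mem_filter] at hj1
      exact ⟨hj1.1, by simpa using hj1.2⟩
    have hinf : ['C', 'G'] <:+: s.dropLast := by
      have hm := PySem.List.mem_pyRange_one.mp hj1'.1
      exact pv_nonempty_infix s j1 hm.1 hm.2 hj1'.2
    obtain ⟨_, _, hle⟩ := hPre hinf
    rw [if_neg (by simp [hLnil])]
    have hcB : (PySem.List.pyRange 0 ((s.length : Int) - 2)).countP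
        (fun j => decide (PySem.Str.slice r_seq (some j) (some (j + 2)) = "CG") &&
          decide (r_start + j < sv))
        = L.countP (fun y => decide (y < sv - r_start)) := by
      rw [hL, List.countP_filter]
      apply List.countP_congr
      intro j hj
      have hj' := (PySem.List.mem_pyRange_one.mp hj).1
      simp only [Bool.and_eq_true, decide_eq_true_eq]
      rw [pv_isCG_iff r_seq j hj']
      constructor
      · rintro ⟨hcg, harith⟩; exact ⟨by omega, hcg⟩
      · rintro ⟨harith, hcg⟩; exact ⟨hcg, by omega⟩
    have hcA : (PySem.List.pyRange 0 ((s.length : Int) - 2)).countP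
        (fun j => decide (PySem.Str.slice r_seq (some j) (some (j + 2)) = "CG") &&
          !decide (r_start + j < sv) && decide (r_start + j > ev))
        = L.countP (fun y => decide (ev - r_start < y)) := by
      rw [hL, List.countP_filter]
      apply List.countP_congr
      intro j hj
      have hj' := (PySem.List.mem_pyRange_one.mp hj).1
      simp only [Bool.and_eq_true, Bool.not_eq_eq_eq_not, Bool.not_true, decide_eq_false_iff_not,
        decide_eq_true_eq]
      rw [pv_isCG_iff r_seq j hj']
      constructor
      · rintro ⟨⟨hcg, hnlt⟩, hgt⟩; exact ⟨by omega, hcg⟩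
      · rintro ⟨harith, hcg⟩; exact ⟨⟨hcg, by omega⟩, by omega⟩
    rw [hcB, hcA]
    rw [pv_bisectLeft_eq L (sv - r_start) hsorted, pv_bisectRight_eq L (ev - r_start) hsorted]
    simp
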